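-- pv_equiv track=rewrite | github.com/jirayuwat12/com-prog-1- | final exam/3-6.py | pattern1
-- ===== SOURCE A (Python) =====
-- def pattern1(N):
--     ret = []
--     h = 1
--     for i in range(N):
--         ret.append([])
--         for j in range(N):
--             ret[i].append(0)
--             if (N-j) <= i+1 :
--                 ret[i][j] = h
--                 h+=1
--     return ret
-- ===== SOURCE B (Python) =====
-- def pattern1(N):
--     rows = []
--     for i in range(N):
--         start = 1 + i * (i + 1) // 2
--         rows.append([0] * (N - i - 1) + list(range(start, start + i + 1)))
--     return rows
-- ===== Notes on version B (the rewrite author's own statement) =====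
-- stated objective: simpler
-- what changed: Replaces the per-cell scan-and-test with a running counter by a per-row construction: each row is a zero prefix of length N-i-1 followed by range(start, start+i+1) with the closed-form start 1 + i*(i+1)//2, eliminating the inner loop, the branch and the mutable counter.
import Mathlib
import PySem

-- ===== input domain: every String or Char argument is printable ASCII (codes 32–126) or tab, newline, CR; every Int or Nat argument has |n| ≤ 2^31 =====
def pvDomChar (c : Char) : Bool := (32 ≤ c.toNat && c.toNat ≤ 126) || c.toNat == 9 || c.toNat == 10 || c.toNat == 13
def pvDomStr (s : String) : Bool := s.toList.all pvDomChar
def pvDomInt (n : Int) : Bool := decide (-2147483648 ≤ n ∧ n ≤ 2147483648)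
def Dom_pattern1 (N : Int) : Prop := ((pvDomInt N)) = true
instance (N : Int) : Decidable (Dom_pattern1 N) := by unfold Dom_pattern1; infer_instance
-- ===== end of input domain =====

-- B builds each row directly (zero prefix + closed-form numbered suffix) instead of A's
-- per-cell scan with a running counter; same output, simpler structure (objective: simpler).

-- ===== PORT A =====
-- literal port of A: outer loop appends an empty row, inner loop appends 0 to ret[i]
-- and, when (N-j) <= i+1, assigns ret[i][j] = h and increments h.
-- (indices i, j come from range(N) so they are ≥ 0; .toNat is exact there)
def pattern1 (N : Int) : List (List Int) :=
  ((PySem.List.pyRange 0 N 1).foldl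
    (fun (acc : List (List Int) × Int) i =>
      (PySem.List.pyRange 0 N 1).foldl
        (fun (acc2 : List (List Int) × Int) j =>
          let ret2 := acc2.1.modify i.toNat (fun row => row ++ [0])   -- ret[i].append(0)
          if N - j ≤ i + 1 then
            (ret2.modify i.toNat (fun row => row.set j.toNat acc2.2), acc2.2 + 1)  -- ret[i][j] = h; h += 1
          else
            (ret2, acc2.2))
        (acc.1 ++ [[]], acc.2))                                        -- ret.append([])
    ([], 1)).1

-- ===== PORT B =====
-- B-side helper: one row of the matrix
def pvRowB (N i : Int) : List Int :=
  let start := 1 + PySem.Int.floordiv (i * (i + 1)) 2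
  List.replicate (N - i - 1).toNat 0 ++ PySem.List.pyRange start (start + i + 1) 1

def pattern1_alt (N : Int) : List (List Int) :=
  (PySem.List.pyRange 0 N 1).map (pvRowB N)

-- ===== PRECONDITION & SPEC =====
def Spec_pattern1 (N : Int) (out : List (List Int)) : Prop := out = pattern1_alt N
instance (N : Int) (out : List (List Int)) : Decidable (Spec_pattern1 N out) := by unfold Spec_pattern1; infer_instance

-- ===== CLAIM (what is proved, stated in full; the proofs are below) =====
def Claim_equal_pattern1 : Prop := ∀ (N : Int), Dom_pattern1 N → Spec_pattern1 N (pattern1 N)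

-- ===== LEMMAS AND PROOFS =====

-- named forms of the two loop bodies of port A (definitionally the lambdas in `pattern1`)
def pvInnerStep (N i : Int) (acc2 : List (List Int) × Int) (j : Int) : List (List Int) × Int :=
  let ret2 := acc2.1.modify i.toNat (fun row => row ++ [0])
  if N - j ≤ i + 1 then
    (ret2.modify i.toNat (fun row => row.set j.toNat acc2.2), acc2.2 + 1)
  else
    (ret2, acc2.2)

def pvOuterStep (N : Int) (acc : List (List Int) × Int) (i : Int) : List (List Int) × Int :=
  (PySem.List.pyRange 0 N 1).foldl (pvInnerStep N i) (acc.1 ++ [[]], acc.2)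

theorem pattern1_eq_fold (N : Int) :
    pattern1 N = ((PySem.List.pyRange 0 N 1).foldl (pvOuterStep N) ([], 1)).1 := rfl

-- the inner loop body acting on the single last row only
def pvRowStep (N i : Int) (acc : List Int × Int) (j : Int) : List Int × Int :=
  let row := acc.1 ++ [0]
  if N - j ≤ i + 1 then (row.set j.toNat acc.2, acc.2 + 1) else (row, acc.2)

theorem modify_append_singleton {α : Type} (xs : List α) (x : α) (f : α → α) :
    (xs ++ [x]).modify xs.length f = xs ++ [f x] := by
  induction xs with
  | nil => rfl
  | cons a as ih => simpa [List.modify] using ih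

-- the inner loop over (ret ++ [row]) only touches the last row
theorem inner_lift (N i : Int) (js : List Int) :
    ∀ (ret : List (List Int)) (row : List Int) (h : Int), ret.length = i.toNat →
      js.foldl (pvInnerStep N i) (ret ++ [row], h) =
        (ret ++ [(js.foldl (pvRowStep N i) (row, h)).1], (js.foldl (pvRowStep N i) (row, h)).2) := by
  induction js with
  | nil => intro ret row h _; rfl
  | cons j js ih =>
    intro ret row h hlen
    have hmod1 : (ret ++ [row]).modify i.toNat (fun r => r ++ [0]) = ret ++ [row ++ [0]] := by
      rw [← hlen]; exact modify_append_singleton ret row _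
    by_cases hc : N - j ≤ i + 1
    · have hmod2 : (ret ++ [row ++ [0]]).modify i.toNat (fun r => r.set j.toNat h)
          = ret ++ [(row ++ [0]).set j.toNat h] := by
        rw [← hlen]; exact modify_append_singleton ret (row ++ [0]) _
      simp only [List.foldl_cons, pvInnerStep, pvRowStep, hc, if_pos, hmod1, hmod2]
      exact ih ret _ (h + 1) hlen
    · simp only [List.foldl_cons, pvInnerStep, pvRowStep, hc, if_neg, hmod1, not_false_iff]
      exact ih ret (row ++ [0]) h hlen

theorem set_append_zero (row : List Int) (h : Int) :
    (row ++ [0]).set row.length h = row ++ [h] := by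
  induction row with
  | nil => rfl
  | cons a as ih => simpa [List.set] using ih

-- numbered phase: once the condition holds it keeps holding; each step appends the counter
theorem row_phase_num (N i : Int) :
    ∀ (d : Nat) (j0 : Int) (row : List Int) (h : Int),
      j0 + d = N → N - j0 ≤ i + 1 → 0 ≤ j0 → row.length = j0.toNat →
      (PySem.List.pyRange j0 N 1).foldl (pvRowStep N i) (row, h) =
        (row ++ PySem.List.pyRange h (h + d) 1, h + d) := by
  intro d
  induction d with
  | zero =>
    intro j0 row h hd _ _ _
    simp at hd
    rw [PySem.List.pyRange_one_eq_nil (by omega), PySem.List.pyRange_one_eq_nil (by omega)]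
    simp
  | succ d ih =>
    intro j0 row h hd hc h0 hlen
    rw [PySem.List.pyRange_one_cons (by omega)]
    have hset : (row ++ [0]).set j0.toNat h = row ++ [h] := by
      rw [← hlen]; exact set_append_zero row h
    simp only [List.foldl_cons, pvRowStep, if_pos hc, hset]
    rw [ih (j0 + 1) (row ++ [h]) (h + 1) (by omega) (by omega) (by omega)
        (by simp [hlen]; omega)]
    rw [PySem.List.pyRange_one_cons (a := h) (by omega)]
    push_cast
    simp only [Prod.mk.injEq]
    constructor
    · rw [show h + ((d : Int) + 1) = h + 1 + (d : Int) by ring]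
      simp
    · ring

-- zero phase: below the threshold each step appends a 0
theorem row_phase_zero (N i : Int) (hi : 0 ≤ i) :
    ∀ (d : Nat) (j0 : Int) (row : List Int) (h : Int),
      0 ≤ j0 → j0 + d = N - (i + 1) → row.length = j0.toNat →
      (PySem.List.pyRange j0 N 1).foldl (pvRowStep N i) (row, h) =
        (row ++ List.replicate d 0 ++ PySem.List.pyRange h (h + (i + 1)) 1, h + (i + 1)) := by
  intro d
  induction d with
  | zero =>
    intro j0 row h h0 hd hlen
    have := row_phase_num N i (i + 1).toNat j0 row h (by omega) (by omega) h0 hlen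
    rw [this]
    have : ((i + 1).toNat : Int) = i + 1 := by omega
    simp [this]
  | succ d ih =>
    intro j0 row h h0 hd hlen
    rw [PySem.List.pyRange_one_cons (by omega)]
    simp only [List.foldl_cons, pvRowStep, if_neg (by omega : ¬ N - j0 ≤ i + 1)]
    rw [ih (j0 + 1) (row ++ [0]) h (by omega) (by omega) (by simp [hlen]; omega)]
    simp [List.replicate_succ]

-- the outer loop builds exactly B's rows, with the counter at its closed form
theorem outer_char (N : Int) :
    ∀ (k : Nat), (k : Int) ≤ N →
      (PySem.List.pyRange 0 (k : Int) 1).foldl (pvOuterStep N) ([], 1) =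
        ((PySem.List.pyRange 0 (k : Int) 1).map (pvRowB N),
          1 + PySem.Int.floordiv ((k : Int) * ((k : Int) + 1)) 2) := by
  intro k
  induction k with
  | zero =>
    intro _
    rw [PySem.List.pyRange_one_eq_nil (by omega)]
    simp [PySem.Int.floordiv]
  | succ k ih =>
    intro hk
    have hk' : (k : Int) ≤ N := by push_cast at hk ⊢; omega
    rw [show ((k + 1 : Nat) : Int) = (k : Int) + 1 by push_cast; ring,
        PySem.List.pyRange_one_succ_right (by omega)]
    rw [List.foldl_append, List.map_append, ih hk']
    simp only [List.foldl_cons, List.foldl_nil, List.map_cons, List.map_nil]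
    unfold pvOuterStep
    have hlen : ((PySem.List.pyRange 0 (k : Int) 1).map (pvRowB N)).length = (k : Int).toNat := by
      simp [PySem.List.length_pyRange_one]
    rw [inner_lift N (k : Int) _ _ _ _ hlen]
    rw [row_phase_zero N (k : Int) (by omega)
        (N - ((k : Int) + 1)).toNat 0 [] _ (by omega) (by push_cast at hk; omega) (by simp)]
    have hfd : PySem.Int.floordiv ((k : Int) * ((k : Int) + 1)) 2
        = (k : Int) * ((k : Int) + 1) / 2 := PySem.Int.floordiv_eq_ediv_of_pos (by omega)
    have hfd2 : PySem.Int.floordiv (((k : Int) + 1) * ((k : Int) + 1 + 1)) 2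
        = ((k : Int) + 1) * ((k : Int) + 1 + 1) / 2 := PySem.Int.floordiv_eq_ediv_of_pos (by omega)
    have hdiv : ((k : Int) + 1) * ((k : Int) + 1 + 1) / 2
        = (k : Int) * ((k : Int) + 1) / 2 + ((k : Int) + 1) := by
      rw [show ((k : Int) + 1) * ((k : Int) + 1 + 1) = (k : Int) * ((k : Int) + 1) + ((k : Int) + 1) * 2 by ring]
      exact Int.add_mul_ediv_right _ _ (by omega)
    dsimp only
    simp only [Prod.mk.injEq, List.nil_append]
    refine ⟨?_, by rw [hfd2, hdiv, hfd]; ring⟩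
    congr 1
    unfold pvRowB
    simp only [hfd]
    have e1 : N - ((k : Int) + 1) = N - (k : Int) - 1 := by ring
    have e2 : (1 + (k : Int) * ((k : Int) + 1) / 2) + ((k : Int) + 1)
        = (1 + (k : Int) * ((k : Int) + 1) / 2) + (k : Int) + 1 := by ring
    rw [e1, e2]

-- ===== VERDICT (by name: the statement is the Claim_ definition above) =====
theorem pattern1_spec : Claim_equal_pattern1 := by
  intro N _
  unfold Spec_pattern1 pattern1_alt
  rw [pattern1_eq_fold]
  by_cases hN : N ≤ 0
  · rw [PySem.List.pyRange_one_eq_nil (by omega)]; rfl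
  · have hNk : N = (N.toNat : Int) := by omega
    have h2 := outer_char N N.toNat (by omega)
    rw [← hNk] at h2
    rw [h2]
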